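-- pv_equiv track=rewrite | github.com/amelie-iska/ThermoGFN-IF | scripts/rf3/prepare_reactzyme_rf3_msas.py | _trim_a3m_depth
-- ===== SOURCE A (Python) =====
-- def _trim_a3m_depth(a3m_text: str, max_depth: int | None) -> str:
--     if max_depth is None or max_depth <= 0:
--         return a3m_text
--
--     blocks: list[list[str]] = []
--     current: list[str] = []
--     for line in a3m_text.splitlines(keepends=True):
--         if line.startswith(">"):
--             if current:
--                 blocks.append(current)
--             current = [line]
--         elif current:
--             current.append(line)
--     if current:
--         blocks.append(current)
--
--     if not blocks:
--         return a3m_text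
--
--     trimmed = "".join("".join(block) for block in blocks[:max_depth])
--     if a3m_text.endswith("\n") and not trimmed.endswith("\n"):
--         trimmed += "\n"
--     return trimmed
-- ===== SOURCE B (Python) =====
-- def _trim_a3m_depth(a3m_text: str, max_depth: int | None) -> str:
--     if max_depth is None or max_depth <= 0:
--         return a3m_text
--
--     lines = a3m_text.splitlines(keepends=True)
--     headers = [i for i, line in enumerate(lines) if line.startswith(">")]
--     if not headers:
--         return a3m_text
--
--     end = headers[max_depth] if max_depth < len(headers) else len(lines)
--     trimmed = "".join(lines[headers[0]:end])
--     if a3m_text.endswith("\n") and not trimmed.endswith("\n"):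
--         trimmed += "\n"
--     return trimmed
-- ===== Notes on version B (the rewrite author's own statement) =====
-- stated objective: simpler
-- what changed: Instead of scanning the lines while accumulating a list of per-header block lists and joining the first max_depth of them, B records the indices of the '>' header lines in one enumerate pass and returns the join of the line-list slice from the first header to the (max_depth+1)-th header (or the end), with the same max_depth guard and trailing-newline fix.
import Mathlib
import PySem

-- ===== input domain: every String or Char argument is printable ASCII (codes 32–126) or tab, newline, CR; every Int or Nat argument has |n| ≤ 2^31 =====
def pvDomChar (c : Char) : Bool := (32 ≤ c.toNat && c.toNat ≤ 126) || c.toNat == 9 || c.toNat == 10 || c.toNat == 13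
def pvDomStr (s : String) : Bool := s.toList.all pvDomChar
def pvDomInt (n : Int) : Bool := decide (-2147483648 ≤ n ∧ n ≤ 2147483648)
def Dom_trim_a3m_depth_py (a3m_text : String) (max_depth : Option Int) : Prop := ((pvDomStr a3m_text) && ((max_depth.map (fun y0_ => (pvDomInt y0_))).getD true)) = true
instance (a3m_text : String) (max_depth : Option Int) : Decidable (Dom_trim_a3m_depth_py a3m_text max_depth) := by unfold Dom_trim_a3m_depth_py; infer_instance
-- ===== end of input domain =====

-- B keeps the first max_depth '>'-blocks by slicing the splitlines list between header
-- indices instead of accumulating nested block lists (objective: simpler decomposition).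

-- Hand port of str.splitlines(keepends=True), shared by both ports (both Pythons make this
-- same library call). Exact on Dom's characters, where the only line terminators Python
-- recognises are '\n', '\r' and '\r\n'.
def pvLineSplit : List Char → List Char × List Char
  | [] => ([], [])
  | '\r' :: '\n' :: rest => (['\r', '\n'], rest)
  | '\r' :: rest => (['\r'], rest)
  | '\n' :: rest => (['\n'], rest)
  | c :: rest => (c :: (pvLineSplit rest).1, (pvLineSplit rest).2)

theorem pvLineSplit_snd_length_lt : ∀ (cs : List Char), cs ≠ [] → (pvLineSplit cs).2.length < cs.length := by
  intro cs h
  fun_induction pvLineSplit cs with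
  | case1 => simp at h
  | case2 | case3 | case4 => simp
  | case5 c rest h1 h2 h3 ih =>
    by_cases hr : rest = []
    · subst hr; simp [pvLineSplit]
    · have := ih hr; simp; omega

def pvSplitlinesKeep : List Char → List (List Char)
  | [] => []
  | c :: rest =>
    let p := pvLineSplit (c :: rest)
    p.1 :: pvSplitlinesKeep p.2
termination_by cs => cs.length
decreasing_by exact pvLineSplit_snd_length_lt (c :: rest) (by simp)

-- A's loop body and its post-loop block flush, factored as named helpers of the port.
def pvStep (st : List (List (List Char)) × List (List Char)) (line : List Char) :
    List (List (List Char)) × List (List Char) :=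
  if PySem.Chars.startswith line ['>'] then
    ((if st.2 ≠ [] then st.1 ++ [st.2] else st.1), [line])
  else if st.2 ≠ [] then (st.1, st.2 ++ [line]) else st

def pvFin (st : List (List (List Char)) × List (List Char)) : List (List (List Char)) :=
  if st.2 ≠ [] then st.1 ++ [st.2] else st.1

-- ===== PORT A =====
def trim_a3m_depth_py (a3m_text : String) (max_depth : Option Int) : String :=
  match max_depth with
  | none => a3m_text
  | some d =>
    if d ≤ 0 then a3m_text
    else
      let st := (pvSplitlinesKeep a3m_text.toList).foldl pvStep ([], [])
      let blocks := pvFin st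
      if blocks = [] then a3m_text
      else
        let trimmed := PySem.Chars.join [] ((blocks.take d.toNat).map (PySem.Chars.join []))
        let trimmed2 :=
          if PySem.Chars.endswith a3m_text.toList ['\n'] && !PySem.Chars.endswith trimmed ['\n'] then
            trimmed ++ ['\n']
          else trimmed
        String.ofList trimmed2

-- ===== PORT B =====
def trim_a3m_depth_py_alt (a3m_text : String) (max_depth : Option Int) : String :=
  match max_depth with
  | none => a3m_text
  | some d =>
    if d ≤ 0 then a3m_text
    else
      let lines := pvSplitlinesKeep a3m_text.toList
      let headers := ((PySem.List.enumerate lines).filter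
          (fun p => PySem.Chars.startswith p.2 ['>'])).map Prod.fst
      match headers with
      | [] => a3m_text
      | h0 :: _ =>
        let endIdx : Int :=
          if d < (headers.length : Int) then PySem.List.pyGetD headers d 0
          else (lines.length : Int)
        let trimmed := PySem.Chars.join [] (PySem.List.slice lines (some h0) (some endIdx))
        let trimmed2 :=
          if PySem.Chars.endswith a3m_text.toList ['\n'] && !PySem.Chars.endswith trimmed ['\n'] then
            trimmed ++ ['\n']
          else trimmed
        String.ofList trimmed2

-- ===== PRECONDITION & SPEC =====
def Spec_trim_a3m_depth_py (a3m_text : String) (max_depth : Option Int) (out : String) : Prop := out = trim_a3m_depth_py_alt a3m_text max_depth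
instance (a3m_text : String) (max_depth : Option Int) (out : String) : Decidable (Spec_trim_a3m_depth_py a3m_text max_depth out) := by unfold Spec_trim_a3m_depth_py; infer_instance

-- ===== CLAIM (what is proved, stated in full; the proofs are below) =====
def Claim_equal_trim_a3m_depth_py : Prop := ∀ (a3m_text : String) (max_depth : Option Int), Dom_trim_a3m_depth_py a3m_text max_depth → Spec_trim_a3m_depth_py a3m_text max_depth (trim_a3m_depth_py a3m_text max_depth)

-- ===== LEMMAS AND PROOFS =====

def pvHdr (l : List Char) : Bool := PySem.Chars.startswith l ['>']

def pvGroups : List (List Char) → List (List Char) → List (List (List Char))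
  | cur, [] => [cur]
  | cur, l :: r => if pvHdr l then cur :: pvGroups [l] r else pvGroups (cur ++ [l]) r

def pvKeep : Nat → List (List Char) → List (List Char)
  | _, [] => []
  | k, l :: r => if pvHdr l then (if k = 0 then [] else l :: pvKeep (k - 1) r) else l :: pvKeep k r

def pvHIdxs : List (List Char) → List Nat
  | [] => []
  | l :: r => if pvHdr l then 0 :: (pvHIdxs r).map (· + 1) else (pvHIdxs r).map (· + 1)

theorem pvFin_foldl (ls : List (List Char)) : ∀ (bs : List (List (List Char))) (cur : List (List Char)), cur ≠ [] →
    pvFin (ls.foldl pvStep (bs, cur)) = bs ++ pvGroups cur ls := by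
  induction ls with
  | nil => intro bs cur h; simp [pvFin, pvGroups, h]
  | cons l r ih =>
    intro bs cur h
    by_cases hl : PySem.Chars.startswith l ['>'] = true
    · have hstep : pvStep (bs, cur) l = (bs ++ [cur], [l]) := by simp [pvStep, hl, h]
      rw [List.foldl_cons, hstep, ih (bs ++ [cur]) [l] (by simp)]
      simp [pvGroups, pvHdr, hl]
    · have hstep : pvStep (bs, cur) l = (bs, cur ++ [l]) := by simp [pvStep, hl, h]
      rw [List.foldl_cons, hstep, ih bs (cur ++ [l]) (by simp)]
      simp [pvGroups, pvHdr, hl]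

theorem pvFin_start (ls : List (List Char)) :
    pvFin (ls.foldl pvStep ([], [])) =
      (match ls.dropWhile (fun l => !pvHdr l) with
        | [] => []
        | h :: r => pvGroups [h] r) := by
  induction ls with
  | nil => simp [pvFin]
  | cons l r ih =>
    by_cases hl : PySem.Chars.startswith l ['>'] = true
    · have hstep : pvStep ([], []) l = ([], [l]) := by simp [pvStep, hl]
      rw [List.foldl_cons, hstep, pvFin_foldl r [] [l] (by simp)]
      simp [List.dropWhile, pvHdr, hl]
    · have hstep : pvStep ([], []) l = ([], []) := by simp [pvStep, hl]
      rw [List.foldl_cons, hstep, ih]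
      simp [List.dropWhile, pvHdr, hl]

theorem pvJoin_nil (ps : List (List Char)) : PySem.Chars.join [] ps = ps.flatten := by
  induction ps with
  | nil => rfl
  | cons p ps ih =>
    cases ps with
    | nil => simp [PySem.Chars.join, List.intercalate]
    | cons q qs =>
      simp only [PySem.Chars.join, List.intercalate, List.intersperse] at ih ⊢
      simp [ih]

theorem pvGroups_take_flatten (ls : List (List Char)) : ∀ (cur : List (List Char)) (k : Nat),
    ((pvGroups cur ls).take (k + 1)).flatten = cur ++ pvKeep k ls := by
  induction ls with
  | nil => intro cur k; simp [pvGroups, pvKeep]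
  | cons l r ih =>
    intro cur k
    by_cases hl : pvHdr l = true
    · simp only [pvGroups, hl, if_pos]
      cases k with
      | zero => simp [pvKeep, hl]
      | succ k' =>
        rw [List.take_succ_cons, List.flatten_cons, ih [l] k']
        simp [pvKeep, hl]
    · simp only [pvGroups, hl, Bool.false_eq_true, if_false]
      rw [ih (cur ++ [l]) k]
      simp [pvKeep, hl]

theorem pvGetD_map_add (xs : List Nat) (m : Nat) : ∀ (i d : Nat),
    (xs.map (· + m)).getD i (d + m) = xs.getD i d + m := by
  induction xs with
  | nil => intro i d; simp
  | cons x xs ih =>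
    intro i d
    cases i with
    | zero => simp
    | succ i => exact ih i d

theorem pvKeep_eq_take (ls : List (List Char)) : ∀ (k : Nat),
    pvKeep k ls = ls.take ((pvHIdxs ls).getD k ls.length) := by
  induction ls with
  | nil => intro k; simp [pvKeep, pvHIdxs]
  | cons l r ih =>
    intro k
    by_cases hl : pvHdr l = true
    · cases k with
      | zero => simp [pvKeep, pvHIdxs, hl]
      | succ k' =>
        simp only [pvKeep, pvHIdxs, hl, if_pos, Nat.succ_ne_zero, List.length_cons,
          List.getD_cons_succ, Nat.add_sub_cancel]
        rw [pvGetD_map_add (pvHIdxs r) 1 k' r.length]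
        simp [ih k']
    · simp only [pvKeep, pvHIdxs, hl, Bool.false_eq_true, if_false, List.length_cons]
      rw [pvGetD_map_add (pvHIdxs r) 1 k r.length]
      simp [ih k]

theorem pvHIdxs_append (pre suf : List (List Char)) (h : ∀ l ∈ pre, pvHdr l = false) :
    pvHIdxs (pre ++ suf) = (pvHIdxs suf).map (· + pre.length) := by
  induction pre with
  | nil => simp
  | cons p pre ih =>
    have hp : pvHdr p = false := h p (by simp)
    have ih' := ih (fun l hl => h l (by simp [hl]))
    simp only [List.cons_append, pvHIdxs, hp, Bool.false_eq_true, if_false, ih',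
      List.map_map, List.length_cons]
    apply List.map_congr_left
    intro a _
    simp [Function.comp]
    omega

theorem pvEnum_headers (ls : List (List Char)) : ∀ (k : Int),
    ((PySem.List.enumerate ls k).filter (fun p => PySem.Chars.startswith p.2 ['>'])).map Prod.fst
      = (pvHIdxs ls).map (fun n : Nat => (n : Int) + k) := by
  induction ls with
  | nil => intro k; simp [PySem.List.enumerate, pvHIdxs]
  | cons l r ih =>
    intro k
    have hmap : ∀ (m : Int), ((pvHIdxs r).map (fun n : Nat => n + 1)).map (fun n : Nat => (n : Int) + m)
        = (pvHIdxs r).map (fun n : Nat => (n : Int) + (m + 1)) := by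
      intro m
      rw [List.map_map]
      apply List.map_congr_left
      intro a _
      simp [Function.comp]
      ring
    by_cases hl : PySem.Chars.startswith l ['>'] = true
    · simp only [PySem.List.enumerate, List.filter_cons, hl, if_pos, List.map_cons,
        ih (k + 1), pvHIdxs, pvHdr, hmap k, List.cons.injEq]
      constructor
      · push_cast; ring
      · trivial
    · simp only [PySem.List.enumerate, List.filter_cons, hl, Bool.false_eq_true, if_false,
        ih (k + 1), pvHIdxs, pvHdr, hmap k]

-- ===== VERDICT (by name: the statement is the Claim_ definition above) =====
theorem trim_a3m_depth_py_spec : Claim_equal_trim_a3m_depth_py := by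
  intro s md _
  unfold Spec_trim_a3m_depth_py
  cases md with
  | none => rfl
  | some d =>
    by_cases hd : d ≤ 0
    · simp only [trim_a3m_depth_py, trim_a3m_depth_py_alt, if_pos hd]
    · simp only [trim_a3m_depth_py, trim_a3m_depth_py_alt, if_neg hd]
      rw [pvFin_start, pvEnum_headers]
      generalize hls : pvSplitlinesKeep s.toList = ls
      have hpre : ∀ l ∈ ls.takeWhile (fun l => !pvHdr l), pvHdr l = false := by
        intro l hl
        simpa using List.mem_takeWhile_imp hl
      have hsplit : ls.takeWhile (fun l => !pvHdr l) ++ ls.dropWhile (fun l => !pvHdr l) = ls :=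
        List.takeWhile_append_dropWhile
      rcases hsuf : ls.dropWhile (fun l => !pvHdr l) with _ | ⟨h, r⟩
      · -- no header line: both sides return s
        have hidx : pvHIdxs ls = [] := by
          rw [← hsplit, hsuf, List.append_nil, ← List.append_nil (ls.takeWhile _),
            pvHIdxs_append _ [] hpre]
          simp [pvHIdxs]
        rw [hidx]
        simp
      · -- at least one header
        rw [hsuf] at hsplit
        have hh : pvHdr h = true := by
          have h1 : ls.dropWhile (fun l => !pvHdr l) ≠ [] := by simp [hsuf]
          have h2 := List.head_dropWhile_not (p := fun l => !pvHdr l) (l := ls) h1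
          have h3 : (ls.dropWhile (fun l => !pvHdr l)).head h1 = h := by simp [hsuf]
          rw [h3] at h2
          simpa using h2
        have hgnil : ∀ (rs : List (List Char)) (cur : List (List Char)), pvGroups cur rs ≠ [] := by
          intro rs
          induction rs with
          | nil => intro cur; simp [pvGroups]
          | cons x t ih => intro cur; by_cases hx : pvHdr x = true <;> simp [pvGroups, hx, ih]
        have hidx : pvHIdxs ls = (ls.takeWhile (fun l => !pvHdr l)).length ::
            ((pvHIdxs r).map (fun n : Nat => n + 1)).map
              (fun n : Nat => n + (ls.takeWhile (fun l => !pvHdr l)).length) := by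
          conv_lhs => rw [← hsplit, pvHIdxs_append _ (h :: r) hpre]
          simp only [pvHIdxs, hh, if_pos, List.map_cons, Nat.zero_add]
        rw [hidx]
        simp only [List.map_cons, List.map_map, if_neg (hgnil r [h]), add_zero]
        set P := (List.takeWhile (fun l => !pvHdr l) ls).length with hPdef
        set xs := pvHIdxs r with hxsdef
        have hlen : ls.length = P + (r.length + 1) := by
          rw [← hsplit]; simp [hPdef]
        have hdrop : ls.drop P = h :: r := by
          conv_lhs => rw [← hsplit, hPdef]
          exact List.drop_left
        have hdk : d = ((d.toNat : Nat) : Int) := by omega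
        have key :
            PySem.Chars.join [] (List.map (PySem.Chars.join []) (List.take d.toNat (pvGroups [h] r))) =
            PySem.Chars.join [] (PySem.List.slice ls (some ((P : Nat) : Int))
              (some (if d < (((P : Nat) : Int) :: List.map ((fun n : Nat => (n : Int)) ∘ (fun n : Nat => n + P) ∘ fun n : Nat => n + 1) xs).length
                     then PySem.List.pyGetD (((P : Nat) : Int) :: List.map ((fun n : Nat => (n : Int)) ∘ (fun n : Nat => n + P) ∘ fun n : Nat => n + 1) xs) d 0
                     else (ls.length : Int)))) := by
          obtain ⟨k, hk⟩ : ∃ k, d.toNat = k + 1 := ⟨d.toNat - 1, by omega⟩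
          rw [hdk, hk]
          simp only [Int.toNat_natCast]
          have hA : List.map (PySem.Chars.join []) (List.take (k + 1) (pvGroups [h] r))
              = List.map List.flatten (List.take (k + 1) (pvGroups [h] r)) :=
            List.map_congr_left (fun a _ => pvJoin_nil a)
          rw [pvJoin_nil, pvJoin_nil, hA, ← List.flatten_flatten, pvGroups_take_flatten r [h] k]
          have hkr : pvKeep k r = r.take (xs.getD k r.length) := by
            rw [pvKeep_eq_take r k, ← hxsdef]
          by_cases hc : ((k + 1 : Nat) : Int) < (((P : Nat) : Int) :: List.map ((fun n : Nat => (n : Int)) ∘ (fun n : Nat => n + P) ∘ fun n : Nat => n + 1) xs).length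
          · have hklen : k < xs.length := by
              simp only [List.length_cons, List.length_map] at hc
              omega
            rw [if_pos hc, PySem.List.pyGetD_natCast]
            have hget : (((P : Nat) : Int) :: List.map ((fun n : Nat => (n : Int)) ∘ (fun n : Nat => n + P) ∘ fun n : Nat => n + 1) xs).getD (k + 1) 0
                = ((xs.getD k 0 + 1 + P : Nat) : Int) := by
              rw [List.getD_cons_succ,
                List.getD_eq_getElem _ _ (by simpa using hklen), List.getElem_map,
                List.getD_eq_getElem _ _ hklen]
              simp [Function.comp]
            rw [hget, PySem.List.slice_natCast, Nat.add_sub_cancel, hdrop, List.take_succ_cons]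
            rw [hkr, List.getD_eq_getElem _ _ hklen, List.getD_eq_getElem _ _ hklen]
            rfl
          · have hklen : xs.length ≤ k := by
              simp only [List.length_cons, List.length_map] at hc
              omega
            rw [if_neg hc]
            rw [show (ls.length : Int) = ((ls.length : Nat) : Int) from rfl, PySem.List.slice_natCast, hdrop]
            rw [show ls.length - P = r.length + 1 from by omega, List.take_succ_cons]
            rw [hkr, List.getD_eq_default _ _ (by omega), List.take_length]
            rfl
        rw [key]
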